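-- pv_equiv track=rewrite | github.com/LeoDev8/myLearnings | 01-CS61A<Structure and Interpretation of Computer Programs>/01-Recursion.py | seven_game
-- ===== SOURCE A (Python) =====
-- def has_seven(n):
--     if(n == 0):
--         return False
--     elif(n % 10 == 7):
--         return True
--     else:
--         return has_seven(n // 10)
--
-- def seven_game(n, k):
--     i, who, direction = 1, 1, 1
--     while(i < n):
--         if(has_seven(i) or i % 7 == 0):
--             direction = -direction
--         i += 1
--         who = who + direction
--         if(who > k):
--             who = 1
--         if(who < 1):
--             who = k
--     return who
-- ===== SOURCE B (Python) =====
-- def has_seven(n):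
--     if(n == 0):
--         return False
--     elif(n % 10 == 7):
--         return True
--     else:
--         return has_seven(n // 10)
--
-- def seven_game(n, k):
--     # Segment decomposition: the direction is constant between flip rounds, so
--     # collect the flip rounds, then add up the lengths of the runs between
--     # consecutive boundaries with alternating sign, and map the signed total
--     # back to a player with one modular reduction.
--     flips = [i for i in range(1, n) if has_seven(i) or i % 7 == 0]
--     bounds = [1] + flips + [max(n, 1)]
--     total, sign = 0, 1
--     for a, b in zip(bounds, bounds[1:]):
--         total += sign * (b - a)
--         sign = -sign
--     return total % k + 1
-- ===== Notes on version B (the rewrite author's own statement) =====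
-- stated objective: alternative
-- what changed: B abandons the per-round simulation of the player position: it collects the flip rounds into a list, computes the signed total as an alternating-sign sum of the run lengths between consecutive flip boundaries, and maps that total to a player with one modular reduction.
-- outside the precondition, e.g. on seven_game(10, 0): A returns 0, B raises ZeroDivisionError; on seven_game(10, -2): A returns 1, B returns 0
import Mathlib
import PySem

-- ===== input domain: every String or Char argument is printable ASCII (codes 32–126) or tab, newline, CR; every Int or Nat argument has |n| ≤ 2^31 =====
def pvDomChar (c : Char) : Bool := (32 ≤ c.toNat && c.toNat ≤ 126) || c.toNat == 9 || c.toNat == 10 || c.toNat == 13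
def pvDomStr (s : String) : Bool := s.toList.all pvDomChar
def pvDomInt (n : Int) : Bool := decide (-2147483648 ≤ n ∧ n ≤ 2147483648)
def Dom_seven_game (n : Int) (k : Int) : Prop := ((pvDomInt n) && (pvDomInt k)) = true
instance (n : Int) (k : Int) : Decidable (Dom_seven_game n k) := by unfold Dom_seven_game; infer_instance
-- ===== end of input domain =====

-- B replaces the round-by-round player simulation by a flip-round list, an alternating-sign
-- sum of the run lengths between flip boundaries, and one final modular reduction; proved
-- equal to A for k ≥ 1.

-- ===== PORT A =====
-- Python's has_seven diverges on negative input; seven_game only calls it with i ≥ 1,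
-- so the 'n ≤ 0' guard (false, like n == 0) is never reached with n < 0 from seven_game.
def has_seven (n : Int) : Bool :=
  if n ≤ 0 then false
  else if PySem.Int.mod n 10 == 7 then true
  else has_seven (PySem.Int.floordiv n 10)
termination_by n.toNat
decreasing_by
  rw [PySem.Int.floordiv_eq_ediv_of_pos (by omega)]
  omega

def seven_game_loopA (n k i who direction : Int) : Int :=
  if _h : i < n then
    let direction' := if has_seven i || PySem.Int.mod i 7 == 0 then -direction else direction
    let who1 := who + direction'
    let who2 := if who1 > k then 1 else who1
    let who3 := if who2 < 1 then k else who2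
    seven_game_loopA n k (i + 1) who3 direction'
  else who
termination_by (n - i).toNat
decreasing_by omega

def seven_game (n : Int) (k : Int) : Int :=
  seven_game_loopA n k 1 1 1

-- ===== PORT B =====
def seven_game_alt (n : Int) (k : Int) : Int :=
  let flips := (PySem.List.pyRange 1 n 1).filter (fun i => has_seven i || PySem.Int.mod i 7 == 0)
  let bounds := 1 :: (flips ++ [max n 1])
  let res := (bounds.zip bounds.tail).foldl
      (fun (p : Int × Int) (ab : Int × Int) => (p.1 + p.2 * (ab.2 - ab.1), -p.2)) (0, 1)
  PySem.Int.mod res.1 k + 1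

-- ===== PRECONDITION & SPEC =====
-- Pre_ excludes k < 1 (a game with no players), where A's clamp-based wraparound still
-- returns accidental values (e.g. 0 for k = 0, a value outside [1,k]) while B's modular
-- form raises on k = 0 and differs on k < 0; these inputs are outside the function's
-- natural domain.
def Pre_seven_game (n : Int) (k : Int) : Prop := 1 ≤ k
instance (n : Int) (k : Int) : Decidable (Pre_seven_game n k) := by unfold Pre_seven_game; infer_instance
def pvWitness_seven_game : Int × Int := (10, 3)

def Spec_seven_game (n : Int) (k : Int) (out : Int) : Prop := out = seven_game_alt n k
instance (n : Int) (k : Int) (out : Int) : Decidable (Spec_seven_game n k out) := by unfold Spec_seven_game; infer_instance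

-- ===== CLAIM (what is proved, stated in full; the proofs are below) =====
def Claim_equal_seven_game : Prop := ∀ (n : Int) (k : Int), Dom_seven_game n k → Pre_seven_game n k → Spec_seven_game n k (seven_game n k)

-- ===== LEMMAS AND PROOFS =====

-- proof-side reference: accumulate the per-round direction into a signed total
def refLoop (n i d t : Int) : Int :=
  if _h : i < n then
    let d' := if has_seven i || PySem.Int.mod i 7 == 0 then -d else d
    refLoop n (i + 1) d' (t + d')
  else t
termination_by (n - i).toNat
decreasing_by omega

-- proof-side reference: alternating-sign sum of run lengths between flip boundaries
def segsum (a : Int) (fs : List Int) (last sign t : Int) : Int :=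
  match fs with
  | [] => t + sign * (last - a)
  | f :: fs' => segsum f fs' last (-sign) (t + sign * (f - a))

lemma segsum_shift (fs : List Int) (a last s t : Int) :
    segsum (a + 1) fs last s (t + s) = segsum a fs last s t := by
  cases fs with
  | nil => simp only [segsum]; ring
  | cons f fs' => simp only [segsum]; congr 1; ring

-- B's foldl over zipped boundary pairs computes segsum
lemma fold_eq_segsum (fs : List Int) (a last t sign : Int) :
    (((a :: (fs ++ [last])).zip (fs ++ [last])).foldl
      (fun (p : Int × Int) (ab : Int × Int) => (p.1 + p.2 * (ab.2 - ab.1), -p.2)) (t, sign)).1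
      = segsum a fs last sign t := by
  induction fs generalizing a t sign with
  | nil => simp [segsum, List.zip, List.zipWith]
  | cons f fs' ih => simp only [List.cons_append, List.zip_cons_cons, List.foldl_cons, segsum]; exact ih f _ _

-- the direction-accumulating loop equals the segment sum over the flip rounds
lemma refLoop_eq_segsum (n : Int) : ∀ (m : Nat) (i d t : Int), (n - i).toNat = m →
    refLoop n i d t =
      segsum i ((PySem.List.pyRange i n 1).filter (fun j => has_seven j || PySem.Int.mod j 7 == 0))
        (max n i) d t := by
  intro m
  induction m with
  | zero =>
    intro i d t hm
    rw [refLoop, dif_neg (by omega)]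
    have hr : PySem.List.pyRange i n 1 = [] := by
      rw [PySem.List.pyRange_one]
      have : (n - i).toNat = 0 := by omega
      simp [this]
    rw [hr]
    have hmax : max n i = i := by omega
    rw [hmax]
    simp only [List.filter_nil, segsum, sub_self, mul_zero, add_zero]
  | succ m ih =>
    intro i d t hm
    by_cases hi : i < n
    · rw [refLoop, dif_pos hi]
      have hr : PySem.List.pyRange i n 1 = i :: PySem.List.pyRange (i + 1) n 1 :=
        PySem.List.pyRange_one_cons hi
      rw [hr]
      have hmax : max n i = n := by omega
      have hmax' : max n (i + 1) = n := by omega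
      by_cases hf : (has_seven i || PySem.Int.mod i 7 == 0) = true
      · simp only [List.filter_cons, hf, if_true]
        rw [ih (i + 1) (-d) (t + -d) (by omega), hmax, hmax']
        simp only [segsum, sub_self, mul_zero, add_zero]
        exact segsum_shift _ i n (-d) t
      · simp only [Bool.not_eq_true] at hf
        simp only [List.filter_cons, hf, Bool.false_eq_true, if_false]
        rw [ih (i + 1) d (t + d) (by omega), hmax, hmax']
        exact segsum_shift _ i n d t
    · omega

-- one step of A's clamped update equals one step of the modular accounting
lemma seven_game_step_mod (k total d : Int) (hk : 1 ≤ k) (hd : d = 1 ∨ d = -1) :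
    (if (if PySem.Int.mod total k + 1 + d > k then 1 else PySem.Int.mod total k + 1 + d) < 1
     then k else if PySem.Int.mod total k + 1 + d > k then 1 else PySem.Int.mod total k + 1 + d)
      = PySem.Int.mod (total + d) k + 1 := by
  rw [PySem.Int.mod_eq_emod_of_pos (by omega), PySem.Int.mod_eq_emod_of_pos (by omega)]
  have hr0 : 0 ≤ total % k := Int.emod_nonneg total (by omega)
  have hrk : total % k < k := Int.emod_lt_of_pos total (by omega)
  have hadd : (total % k + d) % k = (total + d) % k := Int.emod_add_emod total k d
  rcases hd with rfl | rfl
  · by_cases hc : total % k + 1 = k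
    · have hval : (total + 1) % k = 0 := by rw [← hadd, hc, Int.emod_self]
      split_ifs <;> omega
    · have hval : (total + 1) % k = total % k + 1 := by
        rw [← hadd]; exact Int.emod_eq_of_lt (by omega) (by omega)
      split_ifs <;> omega
  · by_cases hc : total % k = 0
    · have hval : (total + -1) % k = k - 1 := by
        rw [← hadd]
        have h2 : (total % k + -1 + k * 1) % k = (total % k + -1) % k :=
          Int.add_mul_emod_self_left (total % k + -1) k 1
        rw [← h2, Int.emod_eq_of_lt (by omega) (by omega)]
        omega
      split_ifs <;> omega
    · have hval : (total + -1) % k = total % k - 1 := by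
        rw [← hadd]; exact Int.emod_eq_of_lt (by omega) (by omega)
      split_ifs <;> omega

-- A's loop equals the modular image of the direction-accumulating loop
lemma seven_game_loop_agree (k n : Int) (hk : 1 ≤ k) :
    ∀ (m : Nat) (i who dir total : Int), (n - i).toNat = m →
      (dir = 1 ∨ dir = -1) → who = PySem.Int.mod total k + 1 →
      seven_game_loopA n k i who dir = PySem.Int.mod (refLoop n i dir total) k + 1 := by
  intro m
  induction m with
  | zero =>
    intro i who dir total hm _ hwho
    rw [seven_game_loopA, refLoop]
    rw [dif_neg (by omega), dif_neg (by omega)]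
    exact hwho
  | succ m ih =>
    intro i who dir total hm hdir hwho
    rw [seven_game_loopA, refLoop]
    by_cases hi : i < n
    · rw [dif_pos hi, dif_pos hi]
      simp only []
      set d' := if has_seven i || PySem.Int.mod i 7 == 0 then -dir else dir with hd'
      have hdir' : d' = 1 ∨ d' = -1 := by
        rw [hd']; split <;> omega
      apply ih (i + 1) _ d' (total + d') (by omega) hdir'
      rw [hwho]
      exact seven_game_step_mod k total d' hk hdir'
    · rw [dif_neg hi, dif_neg hi]
      exact hwho

-- ===== VERDICT (by name: the statement is the Claim_ definition above) =====
theorem seven_game_spec : Claim_equal_seven_game := by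
  intro n k _ hpre
  have hk : (1 : Int) ≤ k := hpre
  unfold Spec_seven_game seven_game seven_game_alt
  rw [seven_game_loop_agree k n hk (n - 1).toNat 1 1 1 0 rfl (Or.inl rfl)
      (by rw [PySem.Int.mod_eq_emod_of_pos (by omega), Int.zero_emod]; norm_num)]
  rw [refLoop_eq_segsum n (n - 1).toNat 1 1 0 rfl]
  simp only [List.tail_cons]
  rw [fold_eq_segsum]
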